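-- pv_equiv track=rewrite | github.com/E-eclipse/GADUKA-GANG | GadukaGang/GadukaGang/views.py | _next_skipped_after
-- ===== SOURCE A (Python) =====
-- def _next_skipped_after(order_ids, skipped_ids, current_id):
--     if current_id in order_ids:
--         start = order_ids.index(current_id) + 1
--     else:
--         start = 0
--     for qid in order_ids[start:]:
--         if qid in skipped_ids:
--             return qid
--     return None
-- ===== SOURCE B (Python) =====
-- def _first_at(xs, x, start):
--     # index of the first occurrence of x in xs at or after position start
--     j = start
--     for y in xs[start:]:
--         if y == x:
--             return j
--         j += 1
--     return None
--
-- def _next_skipped_after(order_ids, skipped_ids, current_id):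
--     # For each skipped id, locate its earliest position after the cutoff,
--     # and return the order_ids element at the minimal such position.
--     if current_id in order_ids:
--         start = order_ids.index(current_id) + 1
--     else:
--         start = 0
--     best = None
--     for s in skipped_ids:
--         j = _first_at(order_ids, s, start)
--         if j is not None and (best is None or j < best):
--             best = j
--     return order_ids[best] if best is not None else None
-- ===== Notes on version B (the rewrite author's own statement) =====
-- stated objective: alternative
-- what changed: Instead of scanning order_ids after current_id for the first element present in skipped_ids, B iterates over skipped_ids, computes each skipped id's earliest position after the cutoff, and returns the order_ids element at the minimal such position.
import Mathlib
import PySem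

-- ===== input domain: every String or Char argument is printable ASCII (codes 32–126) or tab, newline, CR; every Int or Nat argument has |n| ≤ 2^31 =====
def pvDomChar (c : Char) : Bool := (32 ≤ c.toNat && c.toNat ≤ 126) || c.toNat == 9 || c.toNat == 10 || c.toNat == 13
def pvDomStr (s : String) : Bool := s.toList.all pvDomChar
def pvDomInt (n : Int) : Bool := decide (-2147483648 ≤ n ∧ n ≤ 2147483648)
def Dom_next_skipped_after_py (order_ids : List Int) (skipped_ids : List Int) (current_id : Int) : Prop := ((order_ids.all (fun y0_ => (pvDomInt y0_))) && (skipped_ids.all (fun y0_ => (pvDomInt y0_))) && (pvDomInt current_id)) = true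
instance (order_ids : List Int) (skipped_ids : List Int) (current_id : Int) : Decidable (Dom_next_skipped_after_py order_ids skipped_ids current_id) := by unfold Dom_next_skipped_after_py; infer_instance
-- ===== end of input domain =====

-- B inverts the traversal: instead of scanning order_ids past current_id for an element of
-- skipped_ids, it finds for each skipped id its earliest position after the cutoff and returns
-- the element at the minimal such position; alternative decomposition, same asymptotic cost.

-- ===== PORT A =====
-- A's 'for qid in order_ids[start:]: if qid in skipped_ids: return qid'
def pvFindSkippedA (xs : List Int) (sk : List Int) : Option Int :=
  match xs with
  | [] => none
  | q :: t => if sk.contains q then some q else pvFindSkippedA t sk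

-- shared by both ports: the common 'start' computation (identical two lines in A and Source B)
def pvStartOf (order_ids : List Int) (current_id : Int) : Nat :=
  if order_ids.contains current_id then
    (PySem.List.index? order_ids current_id).getD 0 + 1
  else 0

def next_skipped_after_py (order_ids : List Int) (skipped_ids : List Int) (current_id : Int) : Option Int :=
  pvFindSkippedA (PySem.List.slice order_ids (some ((pvStartOf order_ids current_id) : Int)) none) skipped_ids

-- ===== PORT B =====
-- Source B's _first_at: 'j = start; for y in xs[start:]: if y == x: return j; j += 1; return None'
def pvFirstAtAux (ys : List Int) (x : Int) (j : Nat) : Option Nat :=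
  match ys with
  | [] => none
  | y :: t => if y == x then some j else pvFirstAtAux t x (j + 1)

def pvFirstAt (xs : List Int) (x : Int) (start : Nat) : Option Nat :=
  pvFirstAtAux (PySem.List.slice xs (some (start : Int)) none) x start

-- Source B's 'if j is not None and (best is None or j < best): best = j'
def pvOmin (best : Option Nat) (j : Option Nat) : Option Nat :=
  match j with
  | none => best
  | some jv =>
    match best with
    | none => some jv
    | some b => if jv < b then some jv else some b

-- Source B's 'for s in skipped_ids: …'
def pvBestLoop (sk : List Int) (xs : List Int) (start : Nat) (best : Option Nat) : Option Nat :=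
  match sk with
  | [] => best
  | s :: t => pvBestLoop t xs start (pvOmin best (pvFirstAt xs s start))

def next_skipped_after_py_alt (order_ids : List Int) (skipped_ids : List Int) (current_id : Int) : Option Int :=
  match pvBestLoop skipped_ids order_ids (pvStartOf order_ids current_id) none with
  | none => none
  | some b => PySem.List.pyGet? order_ids (b : Int)

-- ===== PRECONDITION & SPEC =====
def Spec_next_skipped_after_py (order_ids : List Int) (skipped_ids : List Int) (current_id : Int) (out : Option Int) : Prop := out = next_skipped_after_py_alt order_ids skipped_ids current_id
instance (order_ids : List Int) (skipped_ids : List Int) (current_id : Int) (out : Option Int) : Decidable (Spec_next_skipped_after_py order_ids skipped_ids current_id out) := by unfold Spec_next_skipped_after_py; infer_instance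

-- ===== CLAIM (what is proved, stated in full; the proofs are below) =====
def Claim_equal_next_skipped_after_py : Prop := ∀ (order_ids : List Int) (skipped_ids : List Int) (current_id : Int), Dom_next_skipped_after_py order_ids skipped_ids current_id → Spec_next_skipped_after_py order_ids skipped_ids current_id (next_skipped_after_py order_ids skipped_ids current_id)

-- ===== LEMMAS AND PROOFS =====
-- A's scan is find?
theorem pvFindSkippedA_eq_find? (xs sk : List Int) :
    pvFindSkippedA xs sk = xs.find? (fun y => sk.contains y) := by
  induction xs with
  | nil => rfl
  | cons q t ih => by_cases h : q ∈ sk <;> simp [pvFindSkippedA, List.find?_cons, h, ih]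

-- B's inner search is the (shifted) first-occurrence index
theorem pvFirstAtAux_eq (x : Int) (ys : List Int) :
    ∀ j, pvFirstAtAux ys x j = (List.idxOf? x ys).map (· + j) := by
  induction ys with
  | nil => intro j; rfl
  | cons y t ih =>
    intro j
    by_cases h : y = x
    · simp [pvFirstAtAux, h, List.idxOf?_cons]
    · simp only [pvFirstAtAux, beq_iff_eq, h, if_false, ih (j + 1), List.idxOf?_cons,
        beq_iff_eq, h, if_false, Option.map_map]
      congr 1
      funext k
      simp [Function.comp]
      omega

theorem pvBestLoop_eq_foldl (xs : List Int) (start : Nat) (sk : List Int) :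
    ∀ acc, pvBestLoop sk xs start acc
      = List.foldl pvOmin acc (sk.map (fun s => pvFirstAt xs s start)) := by
  induction sk with
  | nil => intro acc; rfl
  | cons s t ih => intro acc; simp [pvBestLoop, ih]

theorem foldl_pvOmin_some_zero (l : List (Option Nat)) :
    List.foldl pvOmin (some 0) l = some 0 := by
  induction l with
  | nil => rfl
  | cons a t ih =>
    have h : pvOmin (some 0) a = some 0 := by
      cases a with
      | none => rfl
      | some jv => simp [pvOmin]
    simp [List.foldl, h, ih]

theorem foldl_pvOmin_mem_zero (l : List (Option Nat)) (h : some 0 ∈ l) :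
    ∀ acc, List.foldl pvOmin acc l = some 0 := by
  induction l with
  | nil => cases h
  | cons a t ih =>
    intro acc
    by_cases ha : a = some 0
    · subst ha
      have : pvOmin acc (some 0) = some 0 := by
        cases acc with
        | none => rfl
        | some b => cases b <;> simp [pvOmin]
      simp [List.foldl, this, foldl_pvOmin_some_zero]
    · have ht : some 0 ∈ t := by
        cases h with
        | head => exact absurd rfl ha
        | tail _ h' => exact h'
      simp [List.foldl, ih ht]

theorem pvOmin_map_succ (a b : Option Nat) :
    pvOmin (a.map (· + 1)) (b.map (· + 1)) = (pvOmin a b).map (· + 1) := by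
  cases a <;> cases b <;> simp only [pvOmin, Option.map_some, Option.map_none] <;> split_ifs <;> simp_all

theorem foldl_pvOmin_shift (l : List (Option Nat)) :
    ∀ acc, List.foldl pvOmin (acc.map (· + 1)) (l.map (Option.map (· + 1)))
      = (List.foldl pvOmin acc l).map (· + 1) := by
  induction l with
  | nil => intro acc; rfl
  | cons a t ih =>
    intro acc
    simp only [List.map_cons, List.foldl, pvOmin_map_succ, ih]

theorem foldl_pvOmin_shift_none (l : List (Option Nat)) :
    List.foldl pvOmin none (l.map (Option.map (· + 1)))
      = (List.foldl pvOmin none l).map (· + 1) :=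
  foldl_pvOmin_shift l none

-- the min over skipped ids of first-occurrence indices is the index of the first skipped element
theorem foldl_min_idxOf_eq_findIdx? (sk : List Int) (ys : List Int) :
    List.foldl pvOmin none (sk.map (fun s => List.idxOf? s ys))
      = List.findIdx? (fun y => sk.contains y) ys := by
  induction ys with
  | nil =>
    have h : ∀ (n : Nat) (acc : Option Nat), List.foldl pvOmin acc (List.replicate n none) = acc := by
      intro n
      induction n with
      | zero => intro acc; rfl
      | succ m ihm => intro acc; simp [List.replicate_succ, List.foldl, pvOmin, ihm]
    simp [h]
  | cons y t ih =>
    by_cases hy : y ∈ sk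
    · have hmem : some 0 ∈ sk.map (fun s => List.idxOf? s (y :: t)) := by
        refine List.mem_map.mpr ⟨y, hy, ?_⟩
        simp [List.idxOf?_cons]
      rw [foldl_pvOmin_mem_zero _ hmem]
      simp [List.findIdx?_cons, hy]
    · have hcongr : sk.map (fun s => List.idxOf? s (y :: t))
          = (sk.map (fun s => List.idxOf? s t)).map (Option.map (· + 1)) := by
        rw [List.map_map]
        refine List.map_congr_left ?_
        intro s hs
        have hne : (y == s) = false :=
          beq_eq_false_iff_ne.mpr (fun h => hy (h ▸ hs))
        simp [Function.comp, List.idxOf?_cons, hne]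
      rw [hcongr]
      rw [foldl_pvOmin_shift_none (sk.map (fun s => List.idxOf? s t)), ih]
      simp [List.findIdx?_cons, hy]

theorem findIdx?_bind_getElem? (p : Int → Bool) (l : List Int) :
    (List.findIdx? p l).bind (fun i => l[i]?) = List.find? p l := by
  induction l with
  | nil => rfl
  | cons a t ih =>
    by_cases h : p a
    · simp [List.findIdx?_cons, h, List.find?]
    · have hpa : p a = false := by simpa using h
      simp only [List.findIdx?_cons, List.find?_cons, hpa, Bool.false_eq_true, if_false]
      rw [← ih]
      cases hf : List.findIdx? p t with
      | none => simp [hf]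
      | some i => simp [hf]

-- core equality for an arbitrary cutoff
theorem pvCore (xs sk : List Int) (start : Nat) :
    pvFindSkippedA (xs.drop start) sk
      = (match pvBestLoop sk xs start none with
         | none => none
         | some b => PySem.List.pyGet? xs (b : Int)) := by
  have hfa : ∀ s : Int, pvFirstAt xs s start = (List.idxOf? s (xs.drop start)).map (· + start) := by
    intro s
    unfold pvFirstAt
    rw [PySem.List.slice_from_natCast, pvFirstAtAux_eq]
  have hshiftk : ∀ (k : Nat) (l : List (Option Nat)) (acc : Option Nat),
      List.foldl pvOmin (acc.map (· + k)) (l.map (Option.map (· + k)))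
        = (List.foldl pvOmin acc l).map (· + k) := by
    intro k
    induction k with
    | zero => intro l acc; simp
    | succ k ihk =>
      intro l acc
      have h1 : (Option.map (· + (k + 1)) : Option Nat → Option Nat)
          = (Option.map (· + 1)) ∘ (Option.map (· + k)) := by
        funext o; cases o <;> simp [Function.comp]; omega
      calc List.foldl pvOmin (acc.map (· + (k+1))) (l.map (Option.map (· + (k+1))))
          = List.foldl pvOmin (((acc.map (· + k)).map (· + 1)))
              ((l.map (Option.map (· + k))).map (Option.map (· + 1))) := by
            rw [h1]; simp [List.map_map, Option.map_map]
        _ = (List.foldl pvOmin (acc.map (· + k)) (l.map (Option.map (· + k)))).map (· + 1) :=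
            foldl_pvOmin_shift _ _
        _ = ((List.foldl pvOmin acc l).map (· + k)).map (· + 1) := by rw [ihk]
        _ = (List.foldl pvOmin acc l).map (· + (k+1)) := by
            cases List.foldl pvOmin acc l <;> simp; omega
  have hbl : pvBestLoop sk xs start none
      = (List.findIdx? (fun y => sk.contains y) (xs.drop start)).map (· + start) := by
    rw [pvBestLoop_eq_foldl]
    have : sk.map (fun s => pvFirstAt xs s start)
        = (sk.map (fun s => List.idxOf? s (xs.drop start))).map (Option.map (· + start)) := by
      rw [List.map_map]
      exact List.map_congr_left (fun s _ => by simp [Function.comp, hfa s])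
    rw [this]
    have := hshiftk start (sk.map (fun s => List.idxOf? s (xs.drop start))) none
    simp only [Option.map_none] at this
    rw [this, foldl_min_idxOf_eq_findIdx?]
  rw [hbl, pvFindSkippedA_eq_find?]
  rw [← findIdx?_bind_getElem? (fun y => sk.contains y) (xs.drop start)]
  cases hfi : List.findIdx? (fun y => sk.contains y) (xs.drop start) with
  | none => simp
  | some i =>
    simp only [Option.bind_some, Option.map_some]
    rw [PySem.List.pyGet?_natCast]
    rw [List.getElem?_drop]
    congr 1
    omega

-- ===== VERDICT (by name: the statement is the Claim_ definition above) =====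
theorem next_skipped_after_py_spec : Claim_equal_next_skipped_after_py := by
  intro order_ids skipped_ids current_id _
  unfold Spec_next_skipped_after_py next_skipped_after_py next_skipped_after_py_alt
  rw [PySem.List.slice_from_natCast]
  exact pvCore order_ids skipped_ids (pvStartOf order_ids current_id)
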